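-- pv_equiv track=rewrite | github.com/sion0305/python_algorithm | 코테/2022.03.19/#1.py | solution
-- ===== SOURCE A (Python) =====
-- def find_keywords(good):
--   length = len(good)
--   return [good[i:j + 1] for i in range(length) for j in range(i,length)]
--
-- def filter_list(unique):
--     if not unique:
--         return ["None"]
--     result = []
--     min_len = min(unique,key =len)
--     for u in unique:
--         if len(u) == len(min_len):
--             result.append(u)
--     return set(result)
--
-- def solution(goods):
--     answer = []
--     copy_goods = list(goods)
--     for g in goods:
--         unique = []
--         copy_goods = list(goods)
--         keywords = find_keywords(g)
--         copy_goods.remove(g)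
--         temp = ' '.join(s for s in copy_goods)
--         for key in keywords:
--             if key not in temp:
--                 unique.append(key)
--         unique = filter_list(unique)
--         answer.append(' '.join(s for s in sorted(unique)))
--     return answer
-- ===== SOURCE B (Python) =====
-- def solution(goods):
--     answer = []
--     for g in goods:
--         others = list(goods)
--         others.remove(g)
--         temp = ' '.join(others)
--         n = len(g)
--         res = "None"
--         for L in range(1, n + 1):
--             subs = {g[i:i + L] for i in range(n - L + 1)}
--             absent = sorted(s for s in subs if s not in temp)
--             if absent:
--                 res = ' '.join(absent)
--                 break
--         answer.append(res)
--     return answer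
-- ===== Notes on version B (the rewrite author's own statement) =====
-- stated objective: alternative
-- what changed: B searches candidate substrings by increasing length, deduplicating each length with a set and stopping at the first length that has a substring absent from the other goods, instead of A's generation of all substrings followed by a min-length scan and filter.
import Mathlib
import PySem

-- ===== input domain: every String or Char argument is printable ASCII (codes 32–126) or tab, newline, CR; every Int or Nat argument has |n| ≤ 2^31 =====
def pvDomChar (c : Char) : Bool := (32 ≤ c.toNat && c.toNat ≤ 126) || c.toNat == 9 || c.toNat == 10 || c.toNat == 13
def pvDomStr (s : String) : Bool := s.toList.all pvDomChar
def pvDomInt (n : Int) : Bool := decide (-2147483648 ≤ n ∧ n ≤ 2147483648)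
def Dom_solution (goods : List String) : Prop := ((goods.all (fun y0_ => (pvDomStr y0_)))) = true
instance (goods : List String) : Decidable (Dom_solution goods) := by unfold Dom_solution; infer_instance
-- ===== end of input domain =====

-- B replaces A's generate-all-substrings-then-keep-the-shortest scan by a shortest-length-first
-- search with an early exit (a different algorithm with the same return value).

-- ===== PORT A =====
def findKeywords (g : List Char) : List (List Char) :=
  (PySem.List.pyRange 0 (g.length : Int)).flatMap (fun i =>
    (PySem.List.pyRange i (g.length : Int)).map (fun j =>
      PySem.List.slice g (some i) (some (j + 1))))

def filterList (unique : List (List Char)) : List (List Char) :=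
  if unique = [] then [['N','o','n','e']]
  else
    -- min(unique, key=len): unique ≠ [] here, so min? is some and getD's default is never used
    let minLen := (PySem.List.min? unique (fun u => (u.length : Int))).getD []
    let result := unique.foldl (fun r u => if u.length = minLen.length then r ++ [u] else r) []
    PySem.Set.ofList result

def solutionCore (goods : List (List Char)) : List (List Char) :=
  goods.foldl (fun answer g =>
    -- copy_goods = list(goods); copy_goods.remove(g): g ∈ goods, so remove? is some; getD's default never used
    let copy := (PySem.List.remove? goods g).getD []
    let keywords := findKeywords g
    let temp := PySem.Chars.join [' '] copy
    let unique := keywords.foldl (fun u key =>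
      if PySem.Chars.isIn key temp then u else u ++ [key]) []
    answer ++ [PySem.Chars.join [' '] (PySem.List.sorted (filterList unique) (fun x => x) false)]) []

def solution (goods : List String) : List String :=
  (solutionCore (goods.map (·.toList))).map String.ofList

-- ===== PORT B =====
def bSubs (g : List Char) (L : Int) : List (List Char) :=
  PySem.Set.ofList ((PySem.List.pyRange 0 ((g.length : Int) - L + 1)).map (fun i =>
    PySem.List.slice g (some i) (some (i + L))))

def bLoop (g temp : List Char) : List Int → List Char
  | [] => ['N','o','n','e']
  | L :: rest =>
    let absent := PySem.List.sorted ((bSubs g L).filter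
      (fun s => !(PySem.Chars.isIn s temp))) (fun x => x) false
    if absent ≠ [] then PySem.Chars.join [' '] absent else bLoop g temp rest

def solutionAltCore (goods : List (List Char)) : List (List Char) :=
  goods.foldl (fun answer g =>
    let others := (PySem.List.remove? goods g).getD []
    let temp := PySem.Chars.join [' '] others
    answer ++ [bLoop g temp (PySem.List.pyRange 1 ((g.length : Int) + 1))]) []

def solution_alt (goods : List String) : List String :=
  (solutionAltCore (goods.map (·.toList))).map String.ofList

-- ===== PRECONDITION & SPEC =====
def Spec_solution (goods : List String) (out : List String) : Prop := out = solution_alt goods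
instance (goods : List String) (out : List String) : Decidable (Spec_solution goods out) := by unfold Spec_solution; infer_instance

-- ===== CLAIM (what is proved, stated in full; the proofs are below) =====
def Claim_equal_solution : Prop := ∀ (goods : List String), Dom_solution goods → Spec_solution goods (solution goods)

-- ===== LEMMAS AND PROOFS =====

def absentAt (g temp : List Char) (L : Int) : List (List Char) :=
  (bSubs g L).filter (fun s => !(PySem.Chars.isIn s temp))

theorem mem_findKeywords (g x : List Char) :
    x ∈ findKeywords g ↔ ∃ i L : ℕ, 1 ≤ L ∧ i + L ≤ g.length ∧ x = (g.drop i).take L := by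
  unfold findKeywords
  simp only [List.mem_flatMap, List.mem_map, PySem.List.mem_pyRange_one]
  constructor
  · rintro ⟨i, ⟨hi0, hin⟩, j, ⟨hij, hjn⟩, rfl⟩
    obtain ⟨a, rfl⟩ := Int.eq_ofNat_of_zero_le hi0
    obtain ⟨b, rfl⟩ := Int.eq_ofNat_of_zero_le (le_trans hi0 hij)
    have hab : a ≤ b := by exact_mod_cast hij
    have hbn : b < g.length := by exact_mod_cast hjn
    refine ⟨a, b + 1 - a, by omega, by omega, ?_⟩
    have hc : ((b : ℤ) + 1) = ((b + 1 : ℕ) : ℤ) := by push_cast; ring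
    rw [hc, PySem.List.slice_natCast]
  · rintro ⟨i, L, hL, hiL, rfl⟩
    refine ⟨(i : ℤ), ⟨by positivity, by exact_mod_cast (by omega : i < g.length)⟩,
      ((i + L - 1 : ℕ) : ℤ), ⟨?_, ?_⟩, ?_⟩
    · exact_mod_cast (by omega : i ≤ i + L - 1)
    · exact_mod_cast (by omega : i + L - 1 < g.length)
    · have h1 : ((i + L - 1 : ℕ) : ℤ) + 1 = ((i + L : ℕ) : ℤ) := by
        push_cast [Nat.cast_sub (by omega : 1 ≤ i + L)]
        ring
      rw [h1, PySem.List.slice_natCast]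
      congr 1
      omega

theorem mem_bSubs (g x : List Char) (L : ℕ) :
    x ∈ bSubs g (L : ℤ) ↔ ∃ i : ℕ, i + L ≤ g.length ∧ x = (g.drop i).take L := by
  unfold bSubs
  rw [PySem.Set.mem_ofList]
  simp only [List.mem_map, PySem.List.mem_pyRange_one]
  constructor
  · rintro ⟨i, ⟨hi0, hin⟩, rfl⟩
    obtain ⟨a, rfl⟩ := Int.eq_ofNat_of_zero_le hi0
    refine ⟨a, ?_, by rw [PySem.List.slice_natCast_add]⟩
    have := hin
    omega
  · rintro ⟨i, hiL, rfl⟩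
    exact ⟨(i : ℤ), ⟨by positivity, by omega⟩, by rw [PySem.List.slice_natCast_add]⟩

theorem length_sub (g : List Char) (i L : ℕ) (h : i + L ≤ g.length) :
    ((g.drop i).take L).length = L := by
  simp [List.length_take, List.length_drop]; omega

theorem unique_eq (g temp : List Char) :
    (findKeywords g).foldl (fun u key =>
      if PySem.Chars.isIn key temp then u else u ++ [key]) []
    = (findKeywords g).filter (fun k => !(PySem.Chars.isIn k temp)) := by
  have hf : (fun (u : List (List Char)) key =>
      if PySem.Chars.isIn key temp then u else u ++ [key])
      = (fun u key => if (!(PySem.Chars.isIn key temp)) = true then u ++ [key] else u) := by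
    funext u k
    cases PySem.Chars.isIn k temp <;> simp
  rw [hf, PySem.List.foldl_append_if (f := fun k => k)]
  simp

theorem filterList_nonempty (U : List (List Char)) (m : List Char)
    (hne : U ≠ []) (hm : PySem.List.min? U (fun u => (u.length : Int)) = some m) :
    filterList U = PySem.Set.ofList (U.filter (fun u => decide (u.length = m.length))) := by
  simp only [filterList, if_neg hne, hm, Option.getD_some]
  have hf : (fun (r : List (List Char)) u =>
      if u.length = m.length then r ++ [u] else r)
      = (fun r u => if (decide (u.length = m.length)) = true then r ++ [u] else r) := by
    funext r u
    simp
  rw [hf, PySem.List.foldl_append_if (f := fun u => u)]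
  simp

theorem bLoop_none (g temp : List Char) (lst : List Int)
    (h : ∀ L ∈ lst, absentAt g temp L = []) :
    bLoop g temp lst = ['N','o','n','e'] := by
  induction lst with
  | nil => rfl
  | cons L rest ih =>
    show bLoop g temp (L :: rest) = _
    unfold bLoop
    have hL : absentAt g temp L = [] := h L (List.mem_cons_self)
    unfold absentAt at hL
    rw [hL]
    rw [show (PySem.List.sorted ([] : List (List Char)) (fun x => x) false) = [] from rfl]
    rw [if_neg (by simp)]
    exact ih (fun L' hL' => h L' (List.mem_cons_of_mem _ hL'))

theorem sortedLC_perm (xs ys : List (List Char)) (h : xs.Perm ys) :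
    PySem.List.sorted xs (fun x => x) false = PySem.List.sorted ys (fun x => x) false := by
  have hd : (fun (a b : List Char) => a.decidableLT b)
      = (LinearOrder.toDecidableLT : DecidableLT (List Char)) := Subsingleton.elim _ _
  rw [show (fun (a b : List Char) => a.decidableLT b)
      = (LinearOrder.toDecidableLT : DecidableLT (List Char)) from hd]
  exact PySem.List.sorted_eq_sorted_of_perm _ _ _ (fun a b hab => hab) h

theorem bLoop_run (g temp : List Char) (m₀ : ℕ) (hm₀n : m₀ ≤ g.length)
    (hlow : ∀ L : ℕ, 1 ≤ L → L < m₀ → absentAt g temp (L : ℤ) = [])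
    (hne : absentAt g temp (m₀ : ℤ) ≠ []) :
    ∀ (k a : ℕ), 1 ≤ a → a + k = m₀ →
      bLoop g temp (PySem.List.pyRange (a : ℤ) ((g.length : ℤ) + 1))
        = PySem.Chars.join [' ']
            (PySem.List.sorted (absentAt g temp (m₀ : ℤ)) (fun x => x) false) := by
  intro k
  induction k with
  | zero =>
    intro a ha hak
    have haeq : a = m₀ := by omega
    subst haeq
    rw [PySem.List.pyRange_one_cons (by exact_mod_cast (by omega : a < g.length + 1))]
    unfold bLoop
    have hsne : PySem.List.sorted (absentAt g temp (a : ℤ)) (fun x => x) false ≠ [] := by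
      rw [ne_eq, PySem.List.sorted_eq_nil_iff]
      exact hne
    unfold absentAt at hsne ⊢
    rw [if_pos hsne]
  | succ k ih =>
    intro a ha hak
    rw [PySem.List.pyRange_one_cons (by exact_mod_cast (by omega : a < g.length + 1))]
    unfold bLoop
    have hA : absentAt g temp (a : ℤ) = [] := hlow a ha (by omega)
    unfold absentAt at hA
    rw [hA]
    have hs : (PySem.List.sorted ([] : List (List Char)) (fun x => x) false) = [] := rfl
    rw [hs]
    rw [if_neg (by simp)]
    have hcast : ((a : ℤ) + 1) = (((a + 1 : ℕ)) : ℤ) := by push_cast; ring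
    rw [hcast]
    exact ih (a + 1) (by omega) (by omega)

theorem perString (g temp : List Char) :
    PySem.Chars.join [' ']
      (PySem.List.sorted
        (filterList ((findKeywords g).foldl (fun u key =>
          if PySem.Chars.isIn key temp then u else u ++ [key]) []))
        (fun x => x) false)
    = bLoop g temp (PySem.List.pyRange 1 ((g.length : Int) + 1)) := by
  rw [unique_eq]
  by_cases hUe :
      (findKeywords g).filter (fun k => !(PySem.Chars.isIn k temp)) = []
  · -- no unique substring at all: both sides are "None"
    have hK : ∀ k ∈ findKeywords g, ¬ ((!(PySem.Chars.isIn k temp)) = true) :=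
      List.filter_eq_nil_iff.mp hUe
    rw [hUe]
    rw [show filterList [] = [['N','o','n','e']] from rfl,
      show (PySem.List.sorted [['N','o','n','e']] (fun x => x) false)
        = [['N','o','n','e']] from rfl,
      PySem.Chars.join_singleton]
    symm
    apply bLoop_none
    intro L hL
    rw [PySem.List.mem_pyRange_one] at hL
    obtain ⟨a, rfl⟩ := Int.eq_ofNat_of_zero_le (le_trans (by norm_num) hL.1)
    have ha1 : 1 ≤ a := by exact_mod_cast hL.1
    unfold absentAt
    rw [List.filter_eq_nil_iff]
    intro x hx
    rw [mem_bSubs] at hx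
    obtain ⟨i, hiL, rfl⟩ := hx
    exact hK _ ((mem_findKeywords g _).mpr ⟨i, a, ha1, hiL, rfl⟩)
  · -- there is a unique substring: both sides list the shortest ones, sorted
    obtain ⟨m, hm⟩ : ∃ m, PySem.List.min?
        ((findKeywords g).filter (fun k => !(PySem.Chars.isIn k temp)))
        (fun u => (u.length : Int)) = some m := by
      cases h : PySem.List.min?
          ((findKeywords g).filter (fun k => !(PySem.Chars.isIn k temp)))
          (fun u => (u.length : Int)) with
      | none => exact absurd ((PySem.List.min?_eq_none_iff _ _).mp h) hUe
      | some m => exact ⟨m, rfl⟩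
    have hmU := PySem.List.min?_mem hm
    have hmK : m ∈ findKeywords g := (List.mem_filter.mp hmU).1
    have hPm : (!(PySem.Chars.isIn m temp)) = true := (List.mem_filter.mp hmU).2
    obtain ⟨im, Lm, hLm1, hLmn, hmeq⟩ := (mem_findKeywords g m).mp hmK
    have hmlen : m.length = Lm := by rw [hmeq]; exact length_sub g im Lm hLmn
    have h1m : 1 ≤ m.length := by omega
    have hmn : m.length ≤ g.length := by omega
    have hmin : ∀ y ∈ (findKeywords g).filter (fun k => !(PySem.Chars.isIn k temp)),
        m.length ≤ y.length := by
      intro y hy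
      exact_mod_cast PySem.List.min?_isMin hm y hy
    -- membership bridge: shortest unique substrings = absent substrings of length m.length
    have hmemiff : ∀ x, x ∈ PySem.Set.ofList
        (((findKeywords g).filter (fun k => !(PySem.Chars.isIn k temp))).filter
          (fun u => decide (u.length = m.length)))
        ↔ x ∈ absentAt g temp (m.length : ℤ) := by
      intro x
      rw [PySem.Set.mem_ofList, List.mem_filter, List.mem_filter]
      unfold absentAt
      rw [List.mem_filter]
      constructor
      · rintro ⟨⟨hxK, hxP⟩, hxlen⟩
        have hxlen' : x.length = m.length := by simpa using hxlen
        obtain ⟨i, L, _, hiL, rfl⟩ := (mem_findKeywords g x).mp hxK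
        have hLe : L = m.length := by rw [← hxlen']; exact (length_sub g i L hiL).symm
        subst hLe
        exact ⟨(mem_bSubs g _ _).mpr ⟨i, hiL, rfl⟩, hxP⟩
      · rintro ⟨hxS, hxP⟩
        obtain ⟨i, hiL, rfl⟩ := (mem_bSubs g _ _).mp hxS
        refine ⟨⟨(mem_findKeywords g _).mpr ⟨i, m.length, h1m, hiL, rfl⟩, hxP⟩, ?_⟩
        simp [length_sub g i m.length hiL]
    have hperm : (PySem.Set.ofList
        (((findKeywords g).filter (fun k => !(PySem.Chars.isIn k temp))).filter
          (fun u => decide (u.length = m.length)))).Perm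
        (absentAt g temp (m.length : ℤ)) :=
      (List.perm_ext_iff_of_nodup (PySem.Set.nodup_ofList _)
        (by unfold absentAt bSubs; exact (PySem.Set.nodup_ofList _).filter _)).mpr hmemiff
    have hAne : absentAt g temp (m.length : ℤ) ≠ [] := by
      intro h
      have hmem : m ∈ absentAt g temp (m.length : ℤ) := by
        rw [← hmemiff, PySem.Set.mem_ofList, List.mem_filter]
        exact ⟨hmU, by simp⟩
      rw [h] at hmem
      exact absurd hmem (List.not_mem_nil)
    have hlow : ∀ L : ℕ, 1 ≤ L → L < m.length → absentAt g temp (L : ℤ) = [] := by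
      intro L hL1 hLm
      unfold absentAt
      rw [List.filter_eq_nil_iff]
      intro x hx hPx
      obtain ⟨i, hiL, rfl⟩ := (mem_bSubs g _ _).mp hx
      have hxU : (g.drop i).take L ∈
          (findKeywords g).filter (fun k => !(PySem.Chars.isIn k temp)) :=
        List.mem_filter.mpr ⟨(mem_findKeywords g _).mpr ⟨i, L, hL1, hiL, rfl⟩, hPx⟩
      have := hmin _ hxU
      rw [length_sub g i L hiL] at this
      omega
    rw [filterList_nonempty _ m hUe hm, sortedLC_perm _ _ hperm]
    have hrun := bLoop_run g temp m.length hmn hlow hAne (m.length - 1) 1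
      (by omega) (by omega)
    rw [show (((1 : ℕ) : ℤ)) = (1 : ℤ) from rfl] at hrun
    exact hrun.symm

-- ===== VERDICT (by name: the statement is the Claim_ definition above) =====
theorem solution_spec : Claim_equal_solution := by
  intro goods _
  unfold Spec_solution solution solution_alt solutionCore solutionAltCore
  congr 1
  rw [PySem.List.foldl_append_singleton_eq_map, PySem.List.foldl_append_singleton_eq_map]
  simp only [List.nil_append]
  exact List.map_congr_left (fun g _ => perString g _)
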